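-- pv_equiv track=rewrite | github.com/ASSERT-KTH/Mokav | experiments/pynguin/c4b/return-lst/generated_tests/src_529/9/src_529.py | func
-- ===== SOURCE A (Python) =====
-- def func(*args):
-- 	ret_values = []
--
-- 	s = args[0]
-- 	i = 0
-- 	count = 0
-- 	ans = False
-- 	while (i < (len(s) - 1)):
-- 	    if (s[i] == s[(i + 1)]):
-- 	        count = (count + 1)
-- 	        if (count == 6):
-- 	            ans = True
-- 	            break
-- 	    else:
-- 	        count = 0
-- 	    i = (i + 1)
-- 	if (ans == True):
-- 	    ret_values.append('YES')
-- 	else: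
-- 	    ret_values.append('NO')
--
-- 	return ret_values
-- ===== SOURCE B (Python) =====
-- from itertools import groupby
--
--
-- def func(*args):
--     s = args[0]
--     ans = any(sum(1 for _ in g) >= 7 for _, g in groupby(s))
--     return ['YES' if ans else 'NO']
-- ===== Notes on version B (the rewrite author's own statement) =====
-- stated objective: idiomatic
-- what changed: Replaced the index-based while loop counting equal adjacent pairs (break at count==6) by itertools.groupby: group consecutive equal characters and check with any() whether some run has length >= 7.
import Mathlib
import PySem

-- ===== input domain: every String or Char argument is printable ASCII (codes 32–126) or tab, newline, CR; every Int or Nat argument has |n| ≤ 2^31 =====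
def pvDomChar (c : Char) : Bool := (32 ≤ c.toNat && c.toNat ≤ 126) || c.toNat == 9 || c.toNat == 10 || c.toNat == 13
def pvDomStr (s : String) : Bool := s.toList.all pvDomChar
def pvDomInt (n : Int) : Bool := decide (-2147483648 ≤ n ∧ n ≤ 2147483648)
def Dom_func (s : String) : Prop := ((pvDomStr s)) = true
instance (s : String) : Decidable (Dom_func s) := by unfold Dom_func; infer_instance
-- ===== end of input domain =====

-- B replaces A's index-based pair-counting while loop (break at count==6) by grouping
-- consecutive equal characters and asking whether some run has length >= 7 (idiomatic).

-- ===== PORT A =====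
-- the while loop of A: state (i, count); s[i]/s[i+1] are always in range under the guard,
-- so getD is exact there
def funcLoop (l : List Char) (i count : Nat) : Bool :=
  if _h : i < l.length - 1 then
    if l.getD i ' ' == l.getD (i + 1) ' ' then
      if count + 1 == 6 then true
      else funcLoop l (i + 1) (count + 1)
    else funcLoop l (i + 1) 0
  else false
termination_by l.length - 1 - i

def func (s : String) : List String :=
  if funcLoop s.toList 0 0 then ["YES"] else ["NO"]

-- ===== PORT B =====
-- groupby: the lengths of the maximal runs of consecutive equal characters
def runGo (a : Char) (n : Nat) : List Char → List Nat
  | [] => [n]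
  | b :: rest => if a == b then runGo a (n + 1) rest else n :: runGo b 1 rest

def runLengths : List Char → List Nat
  | [] => []
  | a :: rest => runGo a 1 rest

def func_alt (s : String) : List String :=
  if (runLengths s.toList).any (fun n => 7 ≤ n) then ["YES"] else ["NO"]

-- ===== PRECONDITION & SPEC =====
def Spec_func (s : String) (out : List String) : Prop := out = func_alt s
instance (s : String) (out : List String) : Decidable (Spec_func s out) := by unfold Spec_func; infer_instance

-- ===== CLAIM (what is proved, stated in full; the proofs are below) =====
def Claim_equal_func : Prop := ∀ (s : String), Dom_func s → Spec_func s (func s)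

-- ===== LEMMAS AND PROOFS =====

-- suffix form of A's loop, for reasoning
def loopS : List Char → Nat → Bool
  | a :: b :: rest, count =>
    if a == b then
      if count + 1 == 6 then true else loopS (b :: rest) (count + 1)
    else loopS (b :: rest) 0
  | _, _ => false

theorem funcLoop_eq_loopS (l : List Char) (i count : Nat) :
    funcLoop l i count = loopS (l.drop i) count := by
  rw [funcLoop]
  split
  · rename_i h
    have hi : i < l.length := by omega
    have hi1 : i + 1 < l.length := by omega
    have hd : l.drop i = l[i] :: l.drop (i + 1) := List.drop_eq_getElem_cons hi
    have hd1 : l.drop (i + 1) = l[i + 1] :: l.drop (i + 2) := List.drop_eq_getElem_cons hi1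
    rw [hd, hd1, loopS, List.getD_eq_getElem l ' ' hi, List.getD_eq_getElem l ' ' hi1]
    split
    · split
      · rfl
      · rw [funcLoop_eq_loopS, ← hd1]
    · rw [funcLoop_eq_loopS, ← hd1]
  · rename_i h
    have : l.drop i = [] ∨ ∃ a, l.drop i = [a] := by
      rcases hd : l.drop i with _ | ⟨a, rest⟩
      · exact Or.inl rfl
      · right
        have hlen : (l.drop i).length = l.length - i := List.length_drop ..
        rw [hd] at hlen
        have : rest = [] := by
          have : rest.length = 0 := by simp at hlen; omega
          simpa using this
        exact ⟨a, by rw [this]⟩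
    rcases this with h | ⟨a, h⟩ <;> rw [h] <;> rfl
termination_by l.length - 1 - i

theorem runGo_any_of_seven (rest : List Char) (a : Char) (n : Nat) (hn : 7 ≤ n) :
    (runGo a n rest).any (fun m => 7 ≤ m) = true := by
  induction rest generalizing a n with
  | nil => simp [runGo]; omega
  | cons b rest ih =>
    rw [runGo]
    split
    · exact ih a (n + 1) (by omega)
    · simp; left; omega

theorem loopS_eq_runGo (rest : List Char) (a : Char) (count : Nat) (hc : count ≤ 5) :
    loopS (a :: rest) count = (runGo a (count + 1) rest).any (fun m => 7 ≤ m) := by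
  induction rest generalizing a count with
  | nil => simp [loopS, runGo]; omega
  | cons b rest ih =>
    rw [loopS, runGo]
    by_cases hab : a == b
    · rw [if_pos hab, if_pos hab]
      have hab' : a = b := by simpa using hab
      by_cases h6 : count + 1 = 6
      · rw [if_pos (by simpa using h6)]
        subst hab'
        exact (runGo_any_of_seven rest a (count + 1 + 1) (by omega)).symm
      · rw [if_neg (by simpa using h6)]
        rw [ih b (count + 1) (by omega), hab']
    · rw [if_neg hab, if_neg hab]
      rw [ih b 0 (by omega)]
      simp
      omega

-- ===== VERDICT (by name: the statement is the Claim_ definition above) =====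
theorem func_spec : Claim_equal_func := by
  intro s _
  unfold Spec_func func func_alt
  rw [funcLoop_eq_loopS]
  rcases h : s.toList with _ | ⟨a, rest⟩
  · rfl
  · simp only [List.drop_zero, runLengths]
    simp only [loopS_eq_runGo rest a 0 (by omega)]
    norm_num
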